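-- pv_equiv track=rewrite | github.com/AshainX/edm-subgenre-classification | test2.py | highscore
-- ===== SOURCE A (Python) =====
-- def highscore(parents):
--     n = len(parents)
--     children = [[] for _ in range(n)]
--     for i in range(1, n):
--         children[parents[i]].append(i)
--
--     subtree = [0] * n
--
--     # DFS to calculate the size of each subtree
--     def dfs(node):
--         size = 1  # Each node counts as part of its own subtree
--         for child in children[node]:
--             size += dfs(child)
--         subtree[node] = size
--         return size
--
--     # Calculate the size of the whole tree
--     totalsize = dfs(0)
--
--     ms = 0
--     countms = 0
--
--     # Now calculate the score for each node
--     for node in range(n):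
--         score = 1
--         remsize = totalsize - subtree[node]  # Size of the rest of the tree
--
--         if remsize > 0:
--             score *= remsize
--
--         # Multiply by the sizes of the subtrees of the current node
--         for child in children[node]:
--             score *= subtree[child]
--
--         if score > ms:
--             ms = score
--             countms = 1
--         elif score == ms:
--             countms += 1
--
--     return countms
-- ===== SOURCE B (Python) =====
-- def highscore(parents):
--     n = len(parents)
--     children = [[] for _ in range(n)]
--     for i in range(1, n):
--         children[parents[i]].append(i)
--     # iterative DFS from the root, recording a preorder of the reachable nodes
--     order = []
--     stack = [0]
--     while stack:
--         v = stack.pop()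
--         order.append(v)
--         stack.extend(children[v])
--     # reversed preorder visits children before parents: accumulate subtree sizes
--     subtree = [0] * n
--     for v in reversed(order):
--         subtree[v] += 1
--         if v:
--             subtree[parents[v]] += subtree[v]
--     total = subtree[0]
--     # product of child subtree sizes, filled in one pass over the parent array
--     prod = [1] * n
--     for i in range(1, n):
--         prod[parents[i]] *= subtree[i]
--     best = 0
--     count = 0
--     for v in range(n):
--         rem = total - subtree[v]
--         score = (rem if rem > 0 else 1) * prod[v]
--         if score > best:
--             best, count = score, 1
--         elif score == best:
--             count += 1
--     return count
-- ===== Notes on version B (the rewrite author's own statement) =====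
-- stated objective: alternative
-- what changed: B replaces A's recursive DFS by an explicit stack that records a preorder of the reachable nodes, computes subtree sizes in one reverse pass that adds each finished size onto its parent, and replaces the scoring loop's inner scan over child lists with a product array filled in a single pass over the parent pointers.
import Mathlib
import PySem

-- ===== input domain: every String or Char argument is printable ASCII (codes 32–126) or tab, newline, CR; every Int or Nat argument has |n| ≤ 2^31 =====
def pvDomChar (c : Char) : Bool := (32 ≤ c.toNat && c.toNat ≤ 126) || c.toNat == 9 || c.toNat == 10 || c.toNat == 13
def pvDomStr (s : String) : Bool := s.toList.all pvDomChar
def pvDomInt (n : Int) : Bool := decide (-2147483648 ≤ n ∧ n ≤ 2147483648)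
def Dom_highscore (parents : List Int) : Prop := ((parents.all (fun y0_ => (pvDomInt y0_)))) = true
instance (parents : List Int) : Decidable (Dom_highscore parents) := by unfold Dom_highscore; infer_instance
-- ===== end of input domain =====

-- B replaces A's recursive DFS by an explicit stack recording a preorder, a reverse pass
-- accumulating subtree sizes onto parents, and a one-pass product array instead of the
-- scoring loop's inner child scan (alternative decomposition, same asymptotic cost).

-- ===== PORT A =====
-- Python index normalization for `children[parents[i]]`; exact for -len ≤ p < len (Pre_ ensures this)
def pvIdx (n : Nat) (p : Int) : Nat := (if p < 0 then p + n else p).toNat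

-- the recursive dfs of A; `fuel` only makes the recursion structural (n+1 is never exhausted
-- on inputs admitted by Pre_): pvDfsA = dfs(node), pvDfsList = its `for child in children[node]` loop
mutual
def pvDfsA (kds : List (List Nat)) : Nat → Nat → List Int → Int × List Int
  | 0, _, st => (0, st)
  | f+1, v, st =>
      let r := pvDfsList kds f (kds.getD v []) 1 st
      (r.1, r.2.set v r.1)
def pvDfsList (kds : List (List Nat)) : Nat → List Nat → Int → List Int → Int × List Int
  | _, [], a, st => (a, st)
  | f, c :: l, a, st =>
      let r2 := pvDfsA kds f c st
      pvDfsList kds f l (a + r2.1) r2.2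
end

def highscore (parents : List Int) : Int :=
  let n := parents.length
  let children := (List.range' 1 (n-1)).foldl
      (fun ch i => ch.modify (pvIdx n (parents.getD i 0)) (fun l => l ++ [i]))
      (List.replicate n ([] : List Nat))
  let r := pvDfsA children (n+1) 0 (List.replicate n (0:Int))
  let totalsize := r.1
  let subtree := r.2
  let res := (List.range n).foldl
      (fun (p : Int × Int) node =>
        let score : Int := 1
        let remsize := totalsize - subtree.getD node 0
        let score := if remsize > 0 then score * remsize else score
        let score := (children.getD node []).foldl (fun s c => s * subtree.getD c 0) score
        if score > p.1 then (score, 1)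
        else if score = p.1 then (p.1, p.2 + 1) else p)
      ((0:Int), (0:Int))
  res.2

-- ===== PORT B =====
-- B's `while stack:` loop; the Python stack (top = last element) is represented top-first,
-- so `stack.extend(children[v])` becomes prepending the reversed child list; fuel n is
-- never exhausted (each node is pushed at most once)
def pvStackOrder (kds : List (List Nat)) : Nat → List Nat → List Nat → List Nat
  | 0, _, order => order
  | _+1, [], order => order
  | f+1, v :: rest, order =>
      pvStackOrder kds f ((kds.getD v []).reverse ++ rest) (order ++ [v])

def highscore_alt (parents : List Int) : Int :=
  let n := parents.length
  let children := (List.range' 1 (n-1)).foldl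
      (fun ch i => ch.modify (pvIdx n (parents.getD i 0)) (fun l => l ++ [i]))
      (List.replicate n ([] : List Nat))
  let order := pvStackOrder children n [0] []
  let subtree := order.reverse.foldl
      (fun st v =>
        let st := st.set v (st.getD v 0 + 1)
        if v ≠ 0 then
          let j := pvIdx n (parents.getD v 0)
          st.set j (st.getD j 0 + st.getD v 0)
        else st)
      (List.replicate n (0:Int))
  let total := subtree.getD 0 0
  let prod := (List.range' 1 (n-1)).foldl
      (fun pr i => pr.modify (pvIdx n (parents.getD i 0)) (fun q => q * subtree.getD i 0))
      (List.replicate n (1:Int))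
  let res := (List.range n).foldl
      (fun (p : Int × Int) v =>
        let rem := total - subtree.getD v 0
        let score := (if rem > 0 then rem else 1) * prod.getD v 0
        if score > p.1 then (score, 1)
        else if score = p.1 then (p.1, p.2 + 1) else p)
      ((0:Int), (0:Int))
  res.2

-- ===== PRECONDITION & SPEC =====
-- Pre_ = exactly the inputs where Python A returns: a nonempty list whose entries at
-- positions 1..n-1 are valid Python indices (A raises IndexError otherwise)
def Pre_highscore (parents : List Int) : Prop :=
  parents ≠ [] ∧ ∀ p ∈ parents.drop 1, -(parents.length : Int) ≤ p ∧ p < parents.length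
instance (parents : List Int) : Decidable (Pre_highscore parents) := by unfold Pre_highscore; infer_instance
def pvWitness_highscore : List Int := [0, 0, 1]
def Spec_highscore (parents : List Int) (out : Int) : Prop := out = highscore_alt parents
instance (parents : List Int) (out : Int) : Decidable (Spec_highscore parents out) := by unfold Spec_highscore; infer_instance

-- ===== CLAIM (what is proved, stated in full; the proofs are below) =====
def Claim_equal_highscore : Prop := ∀ (parents : List Int), Dom_highscore parents → Pre_highscore parents → Spec_highscore parents (highscore parents)

-- ===== LEMMAS AND PROOFS =====

-- ---- proof-only definitions: the parent function, chains, kids, sizes ----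
def pvP (parents : List Int) (i : Nat) : Nat := pvIdx parents.length (parents.getD i 0)
def pvChainOK (P : Nat → Nat) (k v : Nat) : Prop := P^[k] v = 0 ∧ ∀ j < k, P^[j] v ≠ 0
def pvDescb (n : Nat) (P : Nat → Nat) (v u : Nat) : Bool :=
  (List.range (n+1)).any (fun k => P^[k] u == v && (List.range k).all (fun j => P^[j] u != 0))
def pvKids (n : Nat) (P : Nat → Nat) (v : Nat) : List Nat :=
  (List.range' 1 (n-1)).filter (fun i => P i == v)
def pvSz (n : Nat) (P : Nat → Nat) : Nat → Nat → Int
  | 0, _ => 0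
  | f+1, v => 1 + ((pvKids n P v).map (pvSz n P f)).sum

theorem pv_sz_succ (n : Nat) (P : Nat → Nat) (f v : Nat) :
    pvSz n P (f+1) v = 1 + ((pvKids n P v).map (pvSz n P f)).sum := rfl

-- the per-node contribution of one stack segment to the subtree array
def pvC (n : Nat) (P : Nat → Nat) (x w : Nat) : Int :=
  (if pvDescb n P x w then pvSz n P (n+1) w else 0)
  + (if x ≠ 0 ∧ P x = w then pvSz n P (n+1) x else 0)

-- pairwise-disjoint subtrees
def pvDisj (n : Nat) (P : Nat → Nat) (x y : Nat) : Prop :=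
  ∀ u, ¬(pvDescb n P x u = true ∧ pvDescb n P y u = true)

-- ---- small utilities ----
theorem pv_getD_set (st : List Int) (i j : Nat) (v d : Int) (hi : i < st.length) :
    (st.set i v).getD j d = if i = j then v else st.getD j d := by
  simp only [List.getD_eq_getElem?_getD, List.getElem?_set]
  by_cases hij : i = j
  · subst hij; simp [hi]
  · simp [hij]

theorem pv_getD_modify {α : Type} (l : List α) (i j : Nat) (f : α → α) (d : α) (hi : i < l.length) :
    (l.modify i f).getD j d = if i = j then f (l.getD j d) else l.getD j d := by
  simp only [List.getD_eq_getElem?_getD, List.getElem?_modify]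
  by_cases hij : i = j
  · subst hij
    have : i < l.length := hi
    simp [List.getElem?_eq_getElem this]
  · simp [hij]

theorem pv_getD_replicate {α : Type} (n i : Nat) (x d : α) (h : i < n) :
    (List.replicate n x).getD i d = x := by
  simp [List.getD_eq_getElem?_getD, h]

theorem pv_foldl_congr {α β : Type} (l : List α) (f g : β → α → β) (b : β)
    (h : ∀ b' a, a ∈ l → f b' a = g b' a) : l.foldl f b = l.foldl g b := by
  induction l generalizing b with
  | nil => rfl
  | cons a l ih =>
    simp only [List.foldl_cons]
    rw [h b a (List.mem_cons_self)]
    exact ih _ (fun b' a' ha' => h b' a' (List.mem_cons_of_mem _ ha'))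

theorem pv_foldl_mul (l : List Nat) (g : Nat → Int) (a : Int) :
    l.foldl (fun s c => s * g c) a = a * (l.map g).prod := by
  induction l generalizing a with
  | nil => simp
  | cons c l ih => simp [List.foldl_cons, ih, mul_assoc]

theorem pv_sum_swap (L K : List Nat) (F : Nat → Nat → Nat) :
    (L.map (fun u => (K.map (fun c => F c u)).sum)).sum
      = (K.map (fun c => (L.map (fun u => F c u)).sum)).sum := by
  induction K with
  | nil => simp
  | cons c K ih =>
    simp only [List.map_cons, List.sum_cons]
    rw [← ih]
    rw [← List.sum_map_add]

theorem pv_countP_eq_sum (L : List Nat) (p : Nat → Bool) :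
    ((L.filter p).length : Nat) = (L.map (fun u => if p u then 1 else 0)).sum := by
  induction L with
  | nil => simp
  | cons u L ih =>
    by_cases h : p u <;> simp [h, ih] <;> omega

-- ---- chain lemmas ----
theorem pv_iter_lt (n : Nat) (P : Nat → Nat) (hP : ∀ i, 1 ≤ i → i < n → P i < n)
    (k v : Nat) (hv : v < n) (hnz : ∀ j < k, P^[j] v ≠ 0) :
    ∀ j ≤ k, P^[j] v < n := by
  intro j
  induction j with
  | zero => intro _; simpa using hv
  | succ j ih =>
    intro hjk
    have hj : j ≤ k := Nat.le_of_succ_le hjk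
    have h1 : P^[j] v < n := ih hj
    have h2 : P^[j] v ≠ 0 := hnz j hjk
    rw [Function.iterate_succ_apply']
    exact hP _ (Nat.one_le_iff_ne_zero.2 h2) h1

theorem pv_iter_ne (P : Nat → Nat) (k v : Nat) (hc : pvChainOK P k v) :
    ∀ i j, i < j → j ≤ k → P^[i] v ≠ P^[j] v := by
  intro i j hij hjk heq
  obtain ⟨hk, hnz⟩ := hc
  have h1 : P^[(k-j)+i] v = P^[(k-j)+j] v := by
    rw [Function.iterate_add_apply, Function.iterate_add_apply, heq]
  have h2 : (k-j)+j = k := by omega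
  rw [h2, hk] at h1
  exact hnz _ (by omega) h1

theorem pv_chain_lt (n : Nat) (P : Nat → Nat) (hP : ∀ i, 1 ≤ i → i < n → P i < n)
    (k v : Nat) (hc : pvChainOK P k v) (hv : v < n) : k < n := by
  have hlt := pv_iter_lt n P hP k v hv hc.2
  by_contra hcon
  simp only [not_lt] at hcon
  have hinj : Function.Injective (fun j : Fin (n+1) => (⟨P^[j.1] v, hlt j.1 (le_trans (Nat.le_of_lt_succ j.2) hcon)⟩ : Fin n)) := by
    intro i j hEq
    simp only [Fin.mk.injEq] at hEq
    by_contra hneq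
    rcases Nat.lt_or_ge i.1 j.1 with h | h
    · exact pv_iter_ne P k v hc i.1 j.1 h (le_trans (Nat.le_of_lt_succ j.2) hcon) hEq
    · have h' : j.1 < i.1 := by
        rcases Nat.lt_or_ge j.1 i.1 with h2 | h2
        · exact h2
        · exact absurd (Fin.ext (Nat.le_antisymm h2 h)) hneq
      exact pv_iter_ne P k v hc j.1 i.1 h' (le_trans (Nat.le_of_lt_succ i.2) hcon) hEq.symm
  have := Fintype.card_le_of_injective _ hinj
  simp at this

theorem pv_mem_pvKids (n : Nat) (P : Nat → Nat) (v c : Nat) :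
    c ∈ pvKids n P v ↔ 1 ≤ c ∧ c < n ∧ P c = v := by
  simp only [pvKids, List.mem_filter, List.mem_range'_1, beq_iff_eq]
  constructor
  · rintro ⟨⟨h1, h2⟩, h3⟩
    exact ⟨h1, by omega, h3⟩
  · rintro ⟨h1, h2, h3⟩
    exact ⟨⟨h1, by omega⟩, h3⟩

theorem pv_chainOK_kid (n : Nat) (P : Nat → Nat) (k v c : Nat)
    (hc : pvChainOK P k v) (hm : c ∈ pvKids n P v) : pvChainOK P (k+1) c := by
  obtain ⟨h1, h2, h3⟩ := (pv_mem_pvKids n P v c).1 hm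
  constructor
  · rw [Function.iterate_succ_apply, h3]
    exact hc.1
  · intro j hj
    cases j with
    | zero => simpa using (by omega : c ≠ 0)
    | succ j =>
      rw [Function.iterate_succ_apply, h3]
      exact hc.2 j (by omega)

theorem pv_descb_iff (n : Nat) (P : Nat → Nat) (v u : Nat) :
    pvDescb n P v u = true ↔ ∃ k, k ≤ n ∧ P^[k] u = v ∧ ∀ j < k, P^[j] u ≠ 0 := by
  simp only [pvDescb, List.any_eq_true, List.mem_range, List.all_eq_true, beq_iff_eq,
    Bool.and_eq_true, bne_iff_ne, ne_eq, Nat.lt_succ_iff]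

theorem pv_descb_self (n : Nat) (P : Nat → Nat) (v : Nat) : pvDescb n P v v = true := by
  rw [pv_descb_iff]
  exact ⟨0, Nat.zero_le n, rfl, fun j hj => absurd hj (Nat.not_lt_zero j)⟩

theorem pv_descb_zero (n : Nat) (P : Nat → Nat) (x : Nat) :
    pvDescb n P x 0 = true ↔ x = 0 := by
  rw [pv_descb_iff]
  constructor
  · rintro ⟨k, hk, hit, hnz⟩
    cases k with
    | zero => simpa using hit.symm
    | succ k => exact absurd rfl (hnz 0 (by omega))
  · rintro rfl
    exact ⟨0, Nat.zero_le n, rfl, fun j hj => absurd hj (Nat.not_lt_zero j)⟩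

-- combined chain: from u through a kid c of v up to 0
theorem pv_chainOK_through (n : Nat) (P : Nat → Nat) (k v : Nat) (hc : pvChainOK P k v)
    (c u k' : Nat) (hcv : P c = v) (hc0 : c ≠ 0)
    (hit : P^[k'] u = c) (hnz : ∀ j < k', P^[j] u ≠ 0) :
    pvChainOK P (k' + 1 + k) u := by
  constructor
  · have h1 : k' + 1 + k = k + (k' + 1) := by omega
    rw [h1, Function.iterate_add_apply, Function.iterate_succ_apply', hit, hcv]
    exact hc.1
  · intro j hj
    rcases Nat.lt_or_ge j (k'+1) with h | h
    · rcases Nat.lt_or_ge j k' with h2 | h2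
      · exact hnz j h2
      · have : j = k' := by omega
        rw [this, hit]; exact hc0
    · have h2 : j = (j - (k'+1)) + (k' + 1) := by omega
      rw [h2, Function.iterate_add_apply, Function.iterate_succ_apply', hit, hcv]
      exact hc.2 _ (by omega)

theorem pv_desc_decomp (n : Nat) (P : Nat → Nat) (hP : ∀ i, 1 ≤ i → i < n → P i < n)
    (k v u : Nat) (hc : pvChainOK P k v) (hv : v < n) (hu : u < n) :
    (pvDescb n P v u = true ↔ u = v ∨ ∃ c ∈ pvKids n P v, pvDescb n P c u = true) := by
  constructor
  · intro hd
    rw [pv_descb_iff] at hd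
    obtain ⟨k', hk'n, hit, nz⟩ := hd
    cases k' with
    | zero => left; simpa using hit
    | succ k'' =>
      right
      refine ⟨P^[k''] u, ?_, ?_⟩
      · rw [pv_mem_pvKids]
        have hne : P^[k''] u ≠ 0 := nz k'' (by omega)
        have hlt : P^[k''] u < n := pv_iter_lt n P hP k'' u hu (fun j hj => nz j (by omega)) k'' le_rfl
        refine ⟨by omega, hlt, ?_⟩
        have hsucc := Function.iterate_succ_apply' P k'' u
        rw [← hsucc]
        exact hit
      · rw [pv_descb_iff]
        exact ⟨k'', by omega, rfl, fun j hj => nz j (by omega)⟩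
  · rintro (rfl | ⟨c, hcK, hdcu⟩)
    · exact pv_descb_self n P _
    · rw [pv_descb_iff] at hdcu ⊢
      obtain ⟨k', hk'n, hit, nz⟩ := hdcu
      obtain ⟨hc1, hc2, hc3⟩ := (pv_mem_pvKids n P v c).1 hcK
      have hthrough := pv_chainOK_through n P k v hc c u k' hc3 (by omega) hit nz
      have hlen := pv_chain_lt n P hP _ u hthrough hu
      refine ⟨k'+1, by omega, ?_, ?_⟩
      · rw [Function.iterate_succ_apply', hit, hc3]
      · intro j hj
        exact hthrough.2 j (by omega)

theorem pv_desc_disjoint (n : Nat) (P : Nat → Nat) (hP : ∀ i, 1 ≤ i → i < n → P i < n)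
    (k v u c₁ c₂ : Nat) (hc : pvChainOK P k v) (hv : v < n) (hu : u < n)
    (h₁ : c₁ ∈ pvKids n P v) (h₂ : c₂ ∈ pvKids n P v)
    (d₁ : pvDescb n P c₁ u = true) (d₂ : pvDescb n P c₂ u = true) : c₁ = c₂ := by
  have key : ∀ (ca cb ka kb : Nat), ca ∈ pvKids n P v → cb ∈ pvKids n P v →
      P^[ka] u = ca → (∀ j < ka, P^[j] u ≠ 0) →
      P^[kb] u = cb → (∀ j < kb, P^[j] u ≠ 0) → ka < kb → False := by
    intro ca cb ka kb hma hmb hita nza hitb nzb hab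
    obtain ⟨ha1, ha2, ha3⟩ := (pv_mem_pvKids n P v ca).1 hma
    obtain ⟨hb1, hb2, hb3⟩ := (pv_mem_pvKids n P v cb).1 hmb
    have hthrough := pv_chainOK_through n P k v hc cb u kb hb3 (by omega) hitb nzb
    have hva : P^[ka+1] u = v := by rw [Function.iterate_succ_apply', hita, ha3]
    have hvb : P^[kb+1] u = v := by rw [Function.iterate_succ_apply', hitb, hb3]
    exact pv_iter_ne P (kb+1+k) u hthrough (ka+1) (kb+1) (by omega) (by omega) (by rw [hva, hvb])
  rw [pv_descb_iff] at d₁ d₂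
  obtain ⟨k1, hk1, hit1, nz1⟩ := d₁
  obtain ⟨k2, hk2, hit2, nz2⟩ := d₂
  rcases lt_trichotomy k1 k2 with h | h | h
  · exact absurd (key c₁ c₂ k1 k2 h₁ h₂ hit1 nz1 hit2 nz2 h) (fun f => f.elim)
  · rw [← hit1, ← hit2, h]
  · exact absurd (key c₂ c₁ k2 k1 h₂ h₁ hit2 nz2 hit1 nz1 h) (fun f => f.elim)

theorem pv_desc_not_self (n : Nat) (P : Nat → Nat) (k v c : Nat)
    (hc : pvChainOK P k v) (hm : c ∈ pvKids n P v) : pvDescb n P c v = false := by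
  obtain ⟨hc1, hc2, hc3⟩ := (pv_mem_pvKids n P v c).1 hm
  rw [Bool.eq_false_iff]
  intro hd
  rw [pv_descb_iff] at hd
  obtain ⟨k1, hk1, hit1, nz1⟩ := hd
  rcases Nat.lt_or_ge k1 k with h | h
  · have hvv : P^[k1+1] v = v := by rw [Function.iterate_succ_apply', hit1, hc3]
    exact pv_iter_ne P k v hc 0 (k1+1) (by omega) (by omega) (by simpa using hvv.symm)
  · rcases Nat.lt_or_ge k k1 with h2 | h2
    · exact nz1 k h2 hc.1
    · have : k = k1 := by omega
      rw [← this, hc.1] at hit1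
      omega

-- periodic orbits: P^[m] v = v gives P^[a] v = P^[a % m] v
theorem pv_iter_period (P : Nat → Nat) (m v : Nat) (hm : 0 < m) (hper : P^[m] v = v) :
    ∀ a, P^[a] v = P^[a % m] v := by
  intro a
  induction a using Nat.strong_induction_on with
  | _ a ih =>
    rcases Nat.lt_or_ge a m with h | h
    · rw [Nat.mod_eq_of_lt h]
    · have h1 : a = (a - m) + m := by omega
      rw [h1, Function.iterate_add_apply, hper, ih (a - m) (by omega)]
      congr 1
      conv_rhs => rw [h1]
      rw [Nat.add_mod_right]
      simp

-- a reachable node lies on no 0-free cycle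
theorem pv_no_cycle (P : Nat → Nat) (K v m : Nat) (hc : pvChainOK P K v)
    (hm : 0 < m) (hper : P^[m] v = v) (hnz : ∀ i < m, P^[i] v ≠ 0) : False := by
  have h1 := pv_iter_period P m v hm hper K
  have h2 : K % m < m := Nat.mod_lt _ hm
  rw [hc.1] at h1
  exact hnz _ h2 h1.symm

-- a node is never a descendant of one of its own kids (seen from the parent, reachable case)
theorem pv_not_desc_on_parent (n : Nat) (P : Nat → Nat) (K v x : Nat) (hn : 1 ≤ n)
    (hc : pvChainOK P K v) (hv0 : v ≠ 0) (hx : pvDescb n P v x = true) :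
    pvDescb n P x (P v) = false := by
  by_cases hpv0 : P v = 0
  · rw [hpv0, Bool.eq_false_iff]
    intro hd
    have hx0 : x = 0 := (pv_descb_zero n P x).1 hd
    subst hx0
    rw [pv_descb_zero] at hx
    exact hv0 hx
  · rw [Bool.eq_false_iff]
    intro hd
    -- chains: P^[k1] x = v (hx), and P^[k2] (P v) = x (hd); so P v climbs to v, giving a 0-free cycle
    rw [pv_descb_iff] at hx hd
    obtain ⟨k1, _, hit1, nz1⟩ := hx
    obtain ⟨k2, _, hit2, nz2⟩ := hd
    have hK : 1 ≤ K := by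
      rcases Nat.eq_zero_or_pos K with h | h
      · exfalso; apply hv0; have := hc.1; rw [h] at this; simpa using this
      · exact h
    have hcp : pvChainOK P (K-1) (P v) := by
      constructor
      · have : P^[K-1] (P v) = P^[K] v := by
          rw [← Function.iterate_succ_apply]
          congr 1
          omega
        rw [this, hc.1]
      · intro j hj
        have : P^[j] (P v) = P^[j+1] v := (Function.iterate_succ_apply P j v).symm
        rw [this]
        exact hc.2 _ (by omega)
    have hper : P^[k2 + k1 + 1] (P v) = P v := by
      have e1 : P^[k2 + k1 + 1] (P v) = P^[1] (P^[k1 + k2] (P v)) := by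
        rw [← Function.iterate_add_apply]
        congr 1
        omega
      have e2 : P^[k1 + k2] (P v) = P^[k1] (P^[k2] (P v)) := Function.iterate_add_apply P k1 k2 (P v)
      rw [e1, e2, hit2, hit1]
      simp only [Function.iterate_one]
    have hnz : ∀ i < k2 + k1 + 1, P^[i] (P v) ≠ 0 := by
      intro i hi
      rcases Nat.lt_or_ge i k2 with h2 | h2
      · exact nz2 i h2
      · rcases Nat.lt_or_ge i (k2 + k1) with h3 | h3
        · have e : i = (i - k2) + k2 := by omega
          rw [e, Function.iterate_add_apply, hit2]
          exact nz1 _ (by omega)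
        · have e : i = k1 + k2 := by omega
          rw [e, Function.iterate_add_apply, hit2, hit1]
          exact hv0
    exact pv_no_cycle P (K-1) (P v) (k2 + k1 + 1) hcp (by omega) hper hnz

-- sizes are nonnegative, and positive at positive fuel
theorem pv_sz_nonneg (n : Nat) (P : Nat → Nat) : ∀ f v, 0 ≤ pvSz n P f v := by
  intro f
  induction f with
  | zero => intro v; simp [pvSz]
  | succ f ih =>
    intro v
    rw [pv_sz_succ]
    have : 0 ≤ ((pvKids n P v).map (pvSz n P f)).sum := by
      apply List.sum_nonneg
      intro x hx
      obtain ⟨c, _, rfl⟩ := List.mem_map.1 hx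
      exact ih c
    omega

theorem pv_sz_pos (n : Nat) (P : Nat → Nat) (f v : Nat) : 1 ≤ pvSz n P (f+1) v := by
  rw [pv_sz_succ]
  have : 0 ≤ ((pvKids n P v).map (pvSz n P f)).sum := by
    apply List.sum_nonneg
    intro x hx
    obtain ⟨c, _, rfl⟩ := List.mem_map.1 hx
    exact pv_sz_nonneg n P f c
  omega

-- ---- size stabilization and recursion (fuel-independence) ----
theorem pv_sz_stab (n : Nat) (P : Nat → Nat) (hP : ∀ i, 1 ≤ i → i < n → P i < n) :
    ∀ m k v f, n - k ≤ m → pvChainOK P k v → v < n → n - k ≤ f →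
      pvSz n P f v = pvSz n P (f+1) v := by
  intro m
  induction m using Nat.strong_induction_on with
  | _ m IH =>
    intro k v f hm hc hv hf
    have hk : k < n := pv_chain_lt n P hP k v hc hv
    cases f with
    | zero => omega
    | succ f' =>
      show pvSz n P (f'+1) v = pvSz n P (f'+1+1) v
      rw [pv_sz_succ, pv_sz_succ]
      have hmap : (pvKids n P v).map (pvSz n P f') = (pvKids n P v).map (pvSz n P (f'+1)) := by
        apply List.map_congr_left
        intro c hcK
        obtain ⟨hc1, hc2, hc3⟩ := (pv_mem_pvKids n P v c).1 hcK
        exact IH (m-1) (by omega) (k+1) c f' (by omega) (pv_chainOK_kid n P k v c hc hcK) hc2 (by omega)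
      rw [hmap]

theorem pv_sz_eq_top (n : Nat) (P : Nat → Nat) (hP : ∀ i, 1 ≤ i → i < n → P i < n)
    (k v f : Nat) (hc : pvChainOK P k v) (hv : v < n) (hf : n - k ≤ f) (hf2 : f ≤ n+1) :
    pvSz n P f v = pvSz n P (n+1) v := by
  have key : ∀ d f', n - k ≤ f' → f' + d = n + 1 → pvSz n P f' v = pvSz n P (n+1) v := by
    intro d
    induction d with
    | zero => intro f' _ h; rw [show f' = n+1 by omega]
    | succ d ih =>
      intro f' hf' h
      rw [pv_sz_stab n P hP (n-k) k v f' le_rfl hc hv hf']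
      exact ih (f'+1) (by omega) (by omega)
  exact key (n+1-f) f hf (by omega)

theorem pv_sz_rec (n : Nat) (P : Nat → Nat) (hP : ∀ i, 1 ≤ i → i < n → P i < n)
    (k v : Nat) (hc : pvChainOK P k v) (hv : v < n) :
    pvSz n P (n+1) v = 1 + ((pvKids n P v).map (pvSz n P (n+1))).sum := by
  have hk := pv_chain_lt n P hP k v hc hv
  have h1 : pvSz n P (n+1) v = pvSz n P (n-k) v :=
    (pv_sz_eq_top n P hP k v (n-k) hc hv le_rfl (by omega)).symm
  rw [h1, show n - k = (n - k - 1) + 1 by omega, pv_sz_succ]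
  have hmap : (pvKids n P v).map (pvSz n P (n-k-1)) = (pvKids n P v).map (pvSz n P (n+1)) := by
    apply List.map_congr_left
    intro c hcK
    obtain ⟨hc1, hc2, hc3⟩ := (pv_mem_pvKids n P v c).1 hcK
    exact pv_sz_eq_top n P hP (k+1) c (n-k-1) (pv_chainOK_kid n P k v c hc hcK) hc2 (by omega) (by omega)
  rw [hmap]

theorem pv_sum_ind_unique (l : List Nat) (q : Nat → Prop) [DecidablePred q] (c₀ : Nat)
    (hnd : l.Nodup) (hm : c₀ ∈ l) (hq : q c₀) (huniq : ∀ c ∈ l, q c → c = c₀) :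
    (l.map (fun c => if q c then (1:Nat) else 0)).sum = 1 := by
  induction l with
  | nil => simp at hm
  | cons a l ih =>
    simp only [List.map_cons, List.sum_cons]
    rcases List.mem_cons.1 hm with rfl | hm'
    · have hz : (l.map (fun c => if q c then (1:Nat) else 0)).sum = 0 := by
        apply List.sum_eq_zero
        intro x hx
        obtain ⟨c, hcl, hcx⟩ := List.mem_map.1 hx
        have hnq : ¬ q c := fun hqc => (List.nodup_cons.1 hnd).1 ((huniq c (List.mem_cons_of_mem _ hcl) hqc) ▸ hcl)
        rw [if_neg hnq] at hcx
        omega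
      simp [hq, hz]
    · have ha : ¬ q a := by
        intro hqa
        have h1 := huniq a List.mem_cons_self hqa
        subst h1
        exact (List.nodup_cons.1 hnd).1 hm'
      rw [if_neg ha, ih (List.nodup_cons.1 hnd).2 hm'
        (fun c hc hqc => huniq c (List.mem_cons_of_mem _ hc) hqc)]

-- Int version: a sum of guarded constants with at most one active guard
theorem pv_sum_ite_unique (l : List Nat) (q : Nat → Prop) [DecidablePred q] (A : Nat → Int)
    (huniq : ∀ c₁ ∈ l, ∀ c₂ ∈ l, q c₁ → q c₂ → c₁ = c₂) (hnd : l.Nodup) :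
    (l.map (fun c => if q c then A c else 0)).sum
      = (if h : ∃ c ∈ l, q c then A h.choose else 0) := by
  induction l with
  | nil => simp
  | cons a l ih =>
    simp only [List.map_cons, List.sum_cons]
    by_cases hqa : q a
    · have hz : (l.map (fun c => if q c then A c else 0)).sum = 0 := by
        apply List.sum_eq_zero
        intro x hx
        obtain ⟨c, hcl, hcx⟩ := List.mem_map.1 hx
        have : ¬ q c := by
          intro hqc
          have := huniq a List.mem_cons_self c (List.mem_cons_of_mem _ hcl) hqa hqc
          subst this
          exact (List.nodup_cons.1 hnd).1 hcl
        rw [if_neg this] at hcx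
        omega
      have hex : ∃ c ∈ a :: l, q c := ⟨a, List.mem_cons_self, hqa⟩
      rw [if_pos hqa, hz, dif_pos hex]
      have := hex.choose_spec
      have heq : hex.choose = a := huniq _ this.1 a List.mem_cons_self this.2 hqa
      rw [heq]
      omega
    · rw [if_neg hqa, ih (fun c₁ h₁ c₂ h₂ => huniq c₁ (List.mem_cons_of_mem _ h₁) c₂ (List.mem_cons_of_mem _ h₂)) (List.nodup_cons.1 hnd).2]
      by_cases hex : ∃ c ∈ l, q c
      · have hex' : ∃ c ∈ a :: l, q c := ⟨hex.choose, List.mem_cons_of_mem _ hex.choose_spec.1, hex.choose_spec.2⟩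
        rw [dif_pos hex, dif_pos hex']
        have h1 := hex.choose_spec
        have h2 := hex'.choose_spec
        have : hex.choose = hex'.choose := by
          rcases List.mem_cons.1 h2.1 with h | h
          · exfalso; exact hqa (h ▸ h2.2)
          · exact huniq _ (List.mem_cons_of_mem _ h1.1) _ (List.mem_cons_of_mem _ h) h1.2 h2.2
        rw [this]
        omega
      · have hex' : ¬ ∃ c ∈ a :: l, q c := by
          rintro ⟨c, hc, hqc⟩
          rcases List.mem_cons.1 hc with rfl | hc'
          · exact hqa hqc
          · exact hex ⟨c, hc', hqc⟩
        rw [dif_neg hex, dif_neg hex']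
        omega

-- counting characterization of pvSz (used for the fuel bound sz 0 ≤ n)
theorem pv_count_partition (n : Nat) (P : Nat → Nat) (hP : ∀ i, 1 ≤ i → i < n → P i < n)
    (k v : Nat) (hc : pvChainOK P k v) (hv : v < n) :
    ((List.range n).filter (fun u => pvDescb n P v u)).length
      = 1 + ((pvKids n P v).map
          (fun c => ((List.range n).filter (fun u => pvDescb n P c u)).length)).sum := by
  have hnd : (pvKids n P v).Nodup := List.Nodup.filter _ (List.nodup_range')
  have hpt : ∀ u ∈ List.range n,
      (if pvDescb n P v u then (1:Nat) else 0)
        = (if u = v then (1:Nat) else 0)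
          + ((pvKids n P v).map (fun c => if pvDescb n P c u then (1:Nat) else 0)).sum := by
    intro u hu
    have hun : u < n := List.mem_range.1 hu
    by_cases huv : u = v
    · subst huv
      rw [if_pos (pv_descb_self n P u), if_pos rfl]
      have hz : ((pvKids n P u).map (fun c => if pvDescb n P c u then (1:Nat) else 0)).sum = 0 := by
        apply List.sum_eq_zero
        intro x hx
        obtain ⟨c, hcK, hcx⟩ := List.mem_map.1 hx
        rw [pv_desc_not_self n P k u c hc hcK] at hcx
        simpa using hcx.symm
      rw [hz]
    · rw [if_neg huv]
      by_cases hd : pvDescb n P v u = true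
      · rw [if_pos hd]
        rcases (pv_desc_decomp n P hP k v u hc hv hun).1 hd with h | ⟨c₀, hc₀K, hd₀⟩
        · exact absurd h huv
        · rw [pv_sum_ind_unique (pvKids n P v) (fun c => pvDescb n P c u = true) c₀ hnd hc₀K hd₀
            (fun c hcK hqc => pv_desc_disjoint n P hP k v u c c₀ hc hv hun hcK hc₀K hqc hd₀)]
      · rw [if_neg hd]
        have hz : ((pvKids n P v).map (fun c => if pvDescb n P c u then (1:Nat) else 0)).sum = 0 := by
          apply List.sum_eq_zero
          intro x hx
          obtain ⟨c, hcK, hcx⟩ := List.mem_map.1 hx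
          have hnq : ¬ (pvDescb n P c u = true) := fun hq =>
            hd ((pv_desc_decomp n P hP k v u hc hv hun).2 (Or.inr ⟨c, hcK, hq⟩))
          rw [if_neg hnq] at hcx
          omega
        rw [hz]
  rw [pv_countP_eq_sum, List.map_congr_left hpt, List.sum_map_add]
  have h1 : ((List.range n).map (fun u => if u = v then (1:Nat) else 0)).sum = 1 :=
    pv_sum_ind_unique _ (fun u => u = v) v List.nodup_range (List.mem_range.2 hv) rfl (fun c _ h => h)
  rw [h1, pv_sum_swap]
  congr 1
  apply congrArg List.sum
  apply List.map_congr_left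
  intro c _
  exact (pv_countP_eq_sum _ _).symm

theorem pv_sz_eq_count (n : Nat) (P : Nat → Nat) (hP : ∀ i, 1 ≤ i → i < n → P i < n) :
    ∀ m k v, n - k ≤ m → pvChainOK P k v → v < n →
      pvSz n P (n+1) v = (((List.range n).filter (fun u => pvDescb n P v u)).length : Int) := by
  intro m
  induction m using Nat.strong_induction_on with
  | _ m IH =>
    intro k v hm hc hv
    have hk := pv_chain_lt n P hP k v hc hv
    have h2 : ((pvKids n P v).map (pvSz n P (n+1))).sum
        = ((pvKids n P v).map (fun c =>
            (((List.range n).filter (fun u => pvDescb n P c u)).length : Int))).sum := by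
      apply congrArg List.sum
      apply List.map_congr_left
      intro c hcK
      obtain ⟨hc1, hc2, hc3⟩ := (pv_mem_pvKids n P v c).1 hcK
      exact IH (m-1) (by omega) (k+1) c (by omega) (pv_chainOK_kid n P k v c hc hcK) hc2
    rw [pv_sz_rec n P hP k v hc hv, h2, pv_count_partition n P hP k v hc hv]
    rw [Nat.cast_add, Nat.cast_one, Nat.cast_list_sum, List.map_map]
    rfl

-- ---- bucket lemmas (the two `range'` folds that fill children and prod) ----
theorem pv_bucket_mul (F : Nat → Nat) (g : Nat → Int) :
    ∀ (l : List Nat) (init : List Int), (∀ i ∈ l, F i < init.length) →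
      (l.foldl (fun acc i => acc.modify (F i) (fun q => q * g i)) init).length = init.length ∧
      ∀ v, v < init.length →
        (l.foldl (fun acc i => acc.modify (F i) (fun q => q * g i)) init).getD v 0
          = init.getD v 0 * ((l.filter (fun i => F i == v)).map g).prod := by
  intro l
  induction l with
  | nil => intro init _; simp
  | cons i l ih =>
    intro init hb
    have hi : F i < init.length := hb i List.mem_cons_self
    simp only [List.foldl_cons]
    obtain ⟨hl, hg⟩ := ih (init.modify (F i) (fun q => q * g i))
      (fun j hj => by simpa using hb j (List.mem_cons_of_mem _ hj))
    constructor
    · rw [hl]; simp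
    · intro v hv
      rw [hg v (by simpa using hv)]
      rw [pv_getD_modify init (F i) v _ 0 hi]
      simp only [List.filter_cons]
      by_cases hFiv : F i = v
      · simp [hFiv, mul_assoc]
      · simp [hFiv]

theorem pv_bucket_app (F : Nat → Nat) :
    ∀ (l : List Nat) (init : List (List Nat)), (∀ i ∈ l, F i < init.length) →
      (l.foldl (fun acc i => acc.modify (F i) (fun t => t ++ [i])) init).length = init.length ∧
      ∀ v, v < init.length →
        (l.foldl (fun acc i => acc.modify (F i) (fun t => t ++ [i])) init).getD v []
          = init.getD v [] ++ l.filter (fun i => F i == v) := by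
  intro l
  induction l with
  | nil => intro init _; simp
  | cons i l ih =>
    intro init hb
    have hi : F i < init.length := hb i List.mem_cons_self
    simp only [List.foldl_cons]
    obtain ⟨hl, hg⟩ := ih (init.modify (F i) (fun t => t ++ [i]))
      (fun j hj => by simpa using hb j (List.mem_cons_of_mem _ hj))
    constructor
    · rw [hl]; simp
    · intro v hv
      rw [hg v (by simpa using hv)]
      rw [pv_getD_modify init (F i) v _ [] hi]
      simp only [List.filter_cons]
      by_cases hFiv : F i = v
      · simp [hFiv]
      · simp [hFiv]

-- ---- dfs specification (A side) ----
theorem pv_dfs_spec (n : Nat) (P : Nat → Nat) (hP : ∀ i, 1 ≤ i → i < n → P i < n)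
    (kds : List (List Nat)) (hkds : ∀ v, v < n → kds.getD v [] = pvKids n P v) :
    ∀ f k v st, pvChainOK P k v → v < n → n - k < f → st.length = n →
      (pvDfsA kds f v st).1 = pvSz n P (n+1) v ∧
      (pvDfsA kds f v st).2.length = n ∧
      ∀ u, u < n → (pvDfsA kds f v st).2.getD u 0
        = (if pvDescb n P v u then pvSz n P (n+1) u else st.getD u 0) := by
  intro f
  induction f using Nat.strong_induction_on with
  | _ f IHf =>
    intro k v st hc hv hfk hst
    have hk : k < n := pv_chain_lt n P hP k v hc hv
    cases f with
    | zero => omega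
    | succ f' =>
      have inner : ∀ (l : List Nat), (∀ c ∈ l, c ∈ pvKids n P v) →
          ∀ (a : Int) (st0 : List Int), st0.length = n →
          (pvDfsList kds f' l a st0).1 = a + (l.map (pvSz n P (n+1))).sum ∧
          (pvDfsList kds f' l a st0).2.length = n ∧
          ∀ u, u < n → (pvDfsList kds f' l a st0).2.getD u 0
            = (if l.any (fun c => pvDescb n P c u) then pvSz n P (n+1) u else st0.getD u 0) := by
        intro l
        induction l with
        | nil => intro _ a st0 h0; simp [pvDfsList, h0]
        | cons c l ihl =>
          intro hmem a st0 hlen0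
          have hcK : c ∈ pvKids n P v := hmem c List.mem_cons_self
          obtain ⟨hc1, hc2, hc3⟩ := (pv_mem_pvKids n P v c).1 hcK
          have hcc : pvChainOK P (k+1) c := pv_chainOK_kid n P k v c hc hcK
          obtain ⟨h1, h2, h3⟩ := IHf f' (by omega) (k+1) c st0 hcc hc2 (by omega) hlen0
          obtain ⟨g1, g2, g3⟩ := ihl (fun c' hc' => hmem c' (List.mem_cons_of_mem _ hc'))
            (a + (pvDfsA kds f' c st0).1) (pvDfsA kds f' c st0).2 h2
          have hcons : pvDfsList kds f' (c :: l) a st0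
              = pvDfsList kds f' l (a + (pvDfsA kds f' c st0).1) (pvDfsA kds f' c st0).2 := by
            simp only [pvDfsList]
          refine ⟨?_, by rw [hcons]; exact g2, ?_⟩
          · rw [hcons, g1, h1]
            simp [add_assoc]
          · intro u hu
            rw [hcons, g3 u hu, h3 u hu]
            by_cases hdc : pvDescb n P c u = true <;>
              by_cases hdl : l.any (fun c' => pvDescb n P c' u) = true <;>
                simp [List.any_cons, hdc, hdl]
      obtain ⟨i1, i2, i3⟩ := inner (kds.getD v []) (by rw [hkds v hv]; exact fun c h => h) 1 st hst
      have hres : pvDfsA kds (f'+1) v st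
          = ((pvDfsList kds f' (kds.getD v []) 1 st).1,
             (pvDfsList kds f' (kds.getD v []) 1 st).2.set v (pvDfsList kds f' (kds.getD v []) 1 st).1) := by
        simp only [pvDfsA]
      have hSv : (pvDfsList kds f' (kds.getD v []) 1 st).1 = pvSz n P (n+1) v := by
        rw [i1, hkds v hv, pv_sz_rec n P hP k v hc hv]
      rw [hres]
      refine ⟨hSv, by simpa using i2, ?_⟩
      intro u hu
      rw [pv_getD_set _ v u _ 0 (by rw [i2]; exact hv)]
      by_cases huv : v = u
      · subst huv
        rw [if_pos rfl, if_pos (pv_descb_self n P v), hSv]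
      · rw [if_neg huv, i3 u hu]
        have hdec := pv_desc_decomp n P hP k v u hc hv hu
        by_cases hd : pvDescb n P v u = true
        · rw [if_pos hd]
          rcases hdec.1 hd with heq | ⟨c, hcK, hdc⟩
          · exact absurd heq (Ne.symm huv)
          · have hany : (kds.getD v []).any (fun c' => pvDescb n P c' u) = true := by
              rw [hkds v hv, List.any_eq_true]
              exact ⟨c, hcK, hdc⟩
            rw [if_pos hany]
        · rw [if_neg hd]
          have hany : ¬ ((kds.getD v []).any (fun c' => pvDescb n P c' u) = true) := by
            rw [hkds v hv, List.any_eq_true]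
            rintro ⟨c, hcK, hdc⟩
            exact hd (hdec.2 (Or.inr ⟨c, hcK, hdc⟩))
          rw [if_neg hany]

-- ---- B side: the stack DFS and the reverse accumulation pass ----
-- the order list only grows: popping the accumulator out
theorem pv_stackOrder_append (kds : List (List Nat)) :
    ∀ (f : Nat) (stack done : List Nat),
      pvStackOrder kds f stack done = done ++ pvStackOrder kds f stack [] := by
  intro f
  induction f with
  | zero => intro stack done; simp [pvStackOrder]
  | succ f ih =>
    intro stack done
    cases stack with
    | nil => simp [pvStackOrder]
    | cons v rest =>
      show pvStackOrder kds f _ (done ++ [v]) = done ++ pvStackOrder kds f _ ([] ++ [v])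
      rw [ih _ (done ++ [v]), ih _ ([] ++ [v])]
      simp

-- the accumulation step of B's reverse pass (proof-only name for the port's lambda)
def pvStep (parents : List Int) (st : List Int) (v : Nat) : List Int :=
  let st := st.set v (st.getD v 0 + 1)
  if v ≠ 0 then
    let j := pvIdx parents.length (parents.getD v 0)
    st.set j (st.getD j 0 + st.getD v 0)
  else st

-- outside 0..n-1 nothing is a proper descendant (P sends out-of-range nodes to 0)
theorem pv_descb_big (n : Nat) (P : Nat → Nat) (hPbig : ∀ u, n ≤ u → P u = 0)
    (x u : Nat) (hx0 : x ≠ 0) (hxn : x < n) (hd : pvDescb n P x u = true) : u < n := by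
  by_contra hcon
  push_neg at hcon
  rw [pv_descb_iff] at hd
  obtain ⟨k, hk, hit, hnz⟩ := hd
  match k, hit, hnz with
  | 0, hit, _ => exact absurd hit (by simp; omega)
  | 1, hit, _ =>
    simp only [Function.iterate_one] at hit
    rw [hPbig u hcon] at hit
    exact hx0 hit.symm
  | (j+2), _, hnz =>
    apply hnz 1 (by omega)
    simp only [Function.iterate_one]
    exact hPbig u hcon

-- pvDisj is symmetric
theorem pv_disj_symm (n : Nat) (P : Nat → Nat) (x y : Nat) (h : pvDisj n P x y) : pvDisj n P y x :=
  fun u hu => h u ⟨hu.2, hu.1⟩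

-- the main loop invariant of B: folding the reverse of the emitted order over a stack of
-- pairwise-disjoint reachable subtrees adds, to every cell w, the contribution pvC of each
theorem pv_stack_fold (parents : List Int)
    (hP : ∀ i, 1 ≤ i → i < parents.length → pvP parents i < parents.length)
    (hPbig : ∀ u, parents.length ≤ u → pvP parents u = 0)
    (hn : 1 ≤ parents.length)
    (kds : List (List Nat))
    (hkds : ∀ v, v < parents.length → kds.getD v [] = pvKids parents.length (pvP parents) v) :
    ∀ (f : Nat) (stack : List Nat) (st : List Int),
      (∀ x ∈ stack, x < parents.length ∧ ∃ k, pvChainOK (pvP parents) k x) →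
      List.Pairwise (pvDisj parents.length (pvP parents)) stack →
      (stack.map (pvSz parents.length (pvP parents) (parents.length+1))).sum ≤ (f : Int) →
      st.length = parents.length →
      (∀ x ∈ stack, ∀ u, u < parents.length →
          pvDescb parents.length (pvP parents) x u = true → st.getD u 0 = 0) →
      ((pvStackOrder kds f stack []).reverse.foldl (pvStep parents) st).length = parents.length ∧
      ∀ w, w < parents.length →
        ((pvStackOrder kds f stack []).reverse.foldl (pvStep parents) st).getD w 0
          = st.getD w 0 + (stack.map (fun x => pvC parents.length (pvP parents) x w)).sum := by
  intro f
  induction f with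
  | zero =>
    intro stack st h1 _ h3 h4 _
    cases stack with
    | nil => simp [pvStackOrder, h4]
    | cons v rest =>
      exfalso
      obtain ⟨hvn, k, hck⟩ := h1 v List.mem_cons_self
      have hpos := pv_sz_pos parents.length (pvP parents) parents.length v
      have hrest : 0 ≤ (rest.map (pvSz parents.length (pvP parents) (parents.length+1))).sum := by
        apply List.sum_nonneg
        intro x hx
        obtain ⟨c, _, rfl⟩ := List.mem_map.1 hx
        exact pv_sz_nonneg _ _ _ _
      simp only [List.map_cons, List.sum_cons, Nat.cast_zero] at h3
      omega
  | succ f ih =>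
    intro stack st h1 h2 h3 h4 h5
    cases stack with
    | nil => simp [pvStackOrder, h4]
    | cons v rest =>
      obtain ⟨hvn, k, hck⟩ := h1 v List.mem_cons_self
      have hkv : kds.getD v [] = pvKids parents.length (pvP parents) v := hkds v hvn
      have hrest1 : ∀ x ∈ rest, x < parents.length ∧ ∃ k', pvChainOK (pvP parents) k' x :=
        fun x hx => h1 x (List.mem_cons_of_mem _ hx)
      obtain ⟨hdisj, h2rest⟩ := List.pairwise_cons.1 h2
      -- facts about kids
      have hkid_mem : ∀ c ∈ pvKids parents.length (pvP parents) v,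
          1 ≤ c ∧ c < parents.length ∧ pvP parents c = v :=
        fun c hc => (pv_mem_pvKids _ _ _ _).1 hc
      have hkid_chain : ∀ c ∈ pvKids parents.length (pvP parents) v,
          pvChainOK (pvP parents) (k+1) c :=
        fun c hc => pv_chainOK_kid _ _ k v c hck hc
      have hkid_descv : ∀ c ∈ pvKids parents.length (pvP parents) v, ∀ u, u < parents.length →
          pvDescb parents.length (pvP parents) c u = true →
          pvDescb parents.length (pvP parents) v u = true := by
        intro c hc u hu hd
        exact (pv_desc_decomp _ _ hP k v u hck hvn hu).2 (Or.inr ⟨c, hc, hd⟩)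
      have hszrec := pv_sz_rec parents.length (pvP parents) hP k v hck hvn
      -- IH hypotheses for the expanded stack
      have H1' : ∀ x ∈ (kds.getD v []).reverse ++ rest,
          x < parents.length ∧ ∃ k', pvChainOK (pvP parents) k' x := by
        intro x hx
        rcases List.mem_append.1 hx with hx | hx
        · rw [List.mem_reverse, hkv] at hx
          exact ⟨(hkid_mem x hx).2.1, k+1, hkid_chain x hx⟩
        · exact hrest1 x hx
      have hpwkids : List.Pairwise (pvDisj parents.length (pvP parents))
          (pvKids parents.length (pvP parents) v) := by
        have hnd : (pvKids parents.length (pvP parents) v).Nodup :=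
          List.Nodup.filter _ List.nodup_range'
        apply List.Nodup.pairwise_of_forall_ne hnd
        intro c1 hc1 c2 hc2 hne u hu
        have h1' := hkid_mem c1 hc1
        have hun : u < parents.length :=
          pv_descb_big _ _ hPbig c1 u (by omega) h1'.2.1 hu.1
        exact hne (pv_desc_disjoint _ _ hP k v u c1 c2 hck hvn hun hc1 hc2 hu.1 hu.2)
      have H2' : List.Pairwise (pvDisj parents.length (pvP parents))
          ((kds.getD v []).reverse ++ rest) := by
        rw [List.pairwise_append]
        refine ⟨?_, h2rest, ?_⟩
        · rw [List.pairwise_reverse, hkv]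
          exact hpwkids.imp (fun h => pv_disj_symm _ _ _ _ h)
        · intro c hc x hx u hu
          rw [List.mem_reverse, hkv] at hc
          have hc' := hkid_mem c hc
          have hun : u < parents.length :=
            pv_descb_big _ _ hPbig c u (by omega) hc'.2.1 hu.1
          exact hdisj x hx u ⟨hkid_descv c hc u hun hu.1, hu.2⟩
      have H3' : (((kds.getD v []).reverse ++ rest).map
          (pvSz parents.length (pvP parents) (parents.length+1))).sum ≤ ((f:Nat) : Int) := by
        rw [List.map_append, List.sum_append, List.map_reverse, List.sum_reverse, hkv]
        simp only [List.map_cons, List.sum_cons] at h3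
        push_cast at h3 ⊢
        omega
      have H5' : ∀ x ∈ (kds.getD v []).reverse ++ rest, ∀ u, u < parents.length →
          pvDescb parents.length (pvP parents) x u = true → st.getD u 0 = 0 := by
        intro x hx u hu hd
        rcases List.mem_append.1 hx with hx | hx
        · rw [List.mem_reverse, hkv] at hx
          exact h5 v List.mem_cons_self u hu (hkid_descv x hx u hu hd)
        · exact h5 x (List.mem_cons_of_mem _ hx) u hu hd
      obtain ⟨mlen, mval⟩ := ih ((kds.getD v []).reverse ++ rest) st H1' H2' H3' h4 H5'
      -- unfold one step of the order
      have horder : pvStackOrder kds (f+1) (v :: rest) []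
          = [v] ++ pvStackOrder kds f ((kds.getD v []).reverse ++ rest) [] := by
        show pvStackOrder kds f _ ([] ++ [v]) = _
        rw [pv_stackOrder_append kds f _ ([] ++ [v])]
        simp
      rw [horder]
      set mid := (pvStackOrder kds f ((kds.getD v []).reverse ++ rest) []).reverse.foldl
          (pvStep parents) st with hmid
      have hfold : ([v] ++ pvStackOrder kds f ((kds.getD v []).reverse ++ rest) []).reverse.foldl
          (pvStep parents) st = pvStep parents mid v := by
        rw [List.reverse_append, List.foldl_append]
        rfl
      rw [hfold]
      -- names: n := parents.length, P := pvP parents, S := pvSz n P (n+1)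
      have hstv0 : st.getD v 0 = 0 :=
        h5 v List.mem_cons_self v hvn (pv_descb_self _ _ v)
      -- the contribution of `rest` to cell v is zero (disjoint subtrees)
      have F_rest_v : (rest.map (fun x => pvC parents.length (pvP parents) x v)).sum = 0 := by
        apply List.sum_eq_zero
        intro y hy
        obtain ⟨x, hx, rfl⟩ := List.mem_map.1 hy
        have hd1 : ¬ (pvDescb parents.length (pvP parents) x v = true) := by
          intro hd
          exact hdisj x hx v ⟨pv_descb_self _ _ v, hd⟩
        have hd2 : ¬ (x ≠ 0 ∧ pvP parents x = v) := by
          rintro ⟨hx0, hpx⟩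
          have hdvx : pvDescb parents.length (pvP parents) v x = true := by
            rw [pv_descb_iff]
            refine ⟨1, hn, by simpa using hpx, ?_⟩
            intro j hj
            have : j = 0 := by omega
            subst this
            simpa using hx0
          exact hdisj x hx x ⟨hdvx, pv_descb_self _ _ x⟩
        simp [pvC, hd1, hd2]
      -- the contribution of the kids to cell v is exactly their sizes
      have F_kids_v : ((pvKids parents.length (pvP parents) v).map
            (fun c => pvC parents.length (pvP parents) c v)).sum
          = ((pvKids parents.length (pvP parents) v).map
            (pvSz parents.length (pvP parents) (parents.length+1))).sum := by
        apply congrArg List.sum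
        apply List.map_congr_left
        intro c hc
        have h1' := hkid_mem c hc
        have hd1 : pvDescb parents.length (pvP parents) c v = false :=
          pv_desc_not_self _ _ k v c hck hc
        have hd2 : c ≠ 0 ∧ pvP parents c = v := ⟨by omega, h1'.2.2⟩
        simp [pvC, hd1, hd2]
      -- mid values, with the stack sum split into kids and rest
      have hmval : ∀ w, w < parents.length → mid.getD w 0
          = st.getD w 0
            + ((pvKids parents.length (pvP parents) v).map
                (fun c => pvC parents.length (pvP parents) c w)).sum
            + (rest.map (fun x => pvC parents.length (pvP parents) x w)).sum := by
        intro w hw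
        rw [mval w hw, List.map_append, List.sum_append, List.map_reverse, List.sum_reverse, hkv]
        ring
      have hmidv : mid.getD v 0 = pvSz parents.length (pvP parents) (parents.length+1) v - 1 := by
        rw [hmval v hvn, hstv0, F_kids_v, F_rest_v, hszrec]
        ring
      -- the kids' contribution to any other cell w equals v's own contribution
      have hkids_sum : ∀ w, w < parents.length → w ≠ v →
          (v = 0 ∨ pvP parents v ≠ w) →
          ((pvKids parents.length (pvP parents) v).map
              (fun c => pvC parents.length (pvP parents) c w)).sum
            = pvC parents.length (pvP parents) v w := by
        intro w hw hwv hvw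
        have hB : ∀ c ∈ pvKids parents.length (pvP parents) v,
            ¬ (c ≠ 0 ∧ pvP parents c = w) := by
          rintro c hc ⟨_, hpc⟩
          exact hwv (((hkid_mem c hc).2.2 ▸ hpc).symm)
        have hsplit : ((pvKids parents.length (pvP parents) v).map
              (fun c => pvC parents.length (pvP parents) c w)).sum
            = ((pvKids parents.length (pvP parents) v).map
              (fun c => if pvDescb parents.length (pvP parents) c w = true
                then pvSz parents.length (pvP parents) (parents.length+1) w else 0)).sum := by
          apply congrArg List.sum
          apply List.map_congr_left
          intro c hc
          simp [pvC, hB c hc]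
        have hnd : (pvKids parents.length (pvP parents) v).Nodup :=
          List.Nodup.filter _ List.nodup_range'
        rw [hsplit, pv_sum_ite_unique _ _ _
          (fun c₁ h₁ c₂ h₂ hq₁ hq₂ =>
            pv_desc_disjoint _ _ hP k v w c₁ c₂ hck hvn hw h₁ h₂ hq₁ hq₂) hnd]
        have hC2 : ¬ (v ≠ 0 ∧ pvP parents v = w) := by
          rintro ⟨hv0, hpv⟩
          rcases hvw with h | h
          · exact hv0 h
          · exact h hpv
        by_cases hex : ∃ c ∈ pvKids parents.length (pvP parents) v,
            pvDescb parents.length (pvP parents) c w = true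
        · rw [dif_pos hex]
          have hdvw : pvDescb parents.length (pvP parents) v w = true :=
            (pv_desc_decomp _ _ hP k v w hck hvn hw).2
              (Or.inr ⟨hex.choose, hex.choose_spec.1, hex.choose_spec.2⟩)
          simp [pvC, hdvw, hC2]
        · rw [dif_neg hex]
          have hdvw : ¬ (pvDescb parents.length (pvP parents) v w = true) := by
            intro hd
            rcases (pv_desc_decomp _ _ hP k v w hck hvn hw).1 hd with h | h
            · exact hwv h
            · exact hex h
          simp [pvC, hdvw, hC2]
      have hmlenv : v < mid.length := by rw [mlen]; exact hvn
      -- values of st1 := mid.set v (mid[v]+1)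
      have hst1len : (mid.set v (mid.getD v 0 + 1)).length = parents.length := by
        rw [List.length_set, mlen]
      have hst1 : ∀ w, (mid.set v (mid.getD v 0 + 1)).getD w 0
          = if v = w then mid.getD v 0 + 1 else mid.getD w 0 :=
        fun w => pv_getD_set mid v w _ 0 hmlenv
      by_cases hv0 : v = 0
      · -- root step: only the +1
        subst hv0
        have hstep : pvStep parents mid 0 = mid.set 0 (mid.getD 0 0 + 1) := by
          simp [pvStep]
        rw [hstep]
        refine ⟨hst1len, ?_⟩
        intro w hw
        rw [hst1 w]
        simp only [List.map_cons, List.sum_cons]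
        by_cases hw0 : (0:Nat) = w
        · subst hw0
          rw [if_pos rfl, hmidv, F_rest_v]
          have : pvC parents.length (pvP parents) 0 0
              = pvSz parents.length (pvP parents) (parents.length+1) 0 := by
            simp [pvC, pv_descb_self]
          rw [this, hstv0]
          ring
        · rw [if_neg hw0, hmval w hw,
            hkids_sum w hw (fun h => hw0 h.symm) (Or.inl rfl)]
          ring
      · -- interior step: +1 then push onto the parent cell
        have hjn : pvP parents v < parents.length := hP v (by omega) hvn
        have hjv : pvP parents v ≠ v := by
          intro hEq
          apply pv_no_cycle (pvP parents) k v 1 hck (by omega)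
            (by simpa using hEq)
          intro i hi
          have : i = 0 := by omega
          subst this
          simpa using hv0
        have hstep : pvStep parents mid v
            = (mid.set v (mid.getD v 0 + 1)).set (pvP parents v)
                ((mid.set v (mid.getD v 0 + 1)).getD (pvP parents v) 0
                  + (mid.set v (mid.getD v 0 + 1)).getD v 0) := by
          simp [pvStep, hv0, pvP]
        rw [hstep]
        have hjlen : pvP parents v < (mid.set v (mid.getD v 0 + 1)).length := by
          rw [hst1len]; exact hjn
        constructor
        · rw [List.length_set, hst1len]
        intro w hw
        rw [pv_getD_set _ (pvP parents v) w _ 0 hjlen]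
        simp only [List.map_cons, List.sum_cons]
        have hst1v : (mid.set v (mid.getD v 0 + 1)).getD v 0
            = pvSz parents.length (pvP parents) (parents.length+1) v := by
          rw [hst1 v, if_pos rfl, hmidv]
          ring
        by_cases hwj : pvP parents v = w
        · -- w is v's parent: gets everything below v
          subst hwj
          rw [if_pos rfl, hst1 (pvP parents v),
            if_neg (fun h => hjv h.symm), hst1v, hmval (pvP parents v) hw]
          have hCvj : pvC parents.length (pvP parents) v (pvP parents v)
              = pvSz parents.length (pvP parents) (parents.length+1) v := by
            have hd1 : pvDescb parents.length (pvP parents) v (pvP parents v) = false :=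
              pv_not_desc_on_parent parents.length (pvP parents) k v v hn hck hv0
                (pv_descb_self _ _ v)
            simp [pvC, hd1, hv0]
          have hKj : ((pvKids parents.length (pvP parents) v).map
                (fun c => pvC parents.length (pvP parents) c (pvP parents v))).sum = 0 := by
            apply List.sum_eq_zero
            intro y hy
            obtain ⟨c, hc, rfl⟩ := List.mem_map.1 hy
            have h1' := hkid_mem c hc
            have hdvc : pvDescb parents.length (pvP parents) v c = true :=
              hkid_descv c hc c h1'.2.1 (pv_descb_self _ _ c)
            have hd1 : pvDescb parents.length (pvP parents) c (pvP parents v) = false :=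
              pv_not_desc_on_parent parents.length (pvP parents) k v c hn hck hv0 hdvc
            have hd2 : ¬ (c ≠ 0 ∧ pvP parents c = pvP parents v) := by
              rintro ⟨_, hpc⟩
              exact hjv ((h1'.2.2 ▸ hpc).symm)
            simp [pvC, hd1, hd2]
          rw [hCvj, hKj]
          ring
        · rw [if_neg hwj, hst1 w]
          by_cases hwv : v = w
          · -- w = v itself: final value is its size
            subst hwv
            rw [if_pos rfl, hmidv]
            have hCvv : pvC parents.length (pvP parents) v v
                = pvSz parents.length (pvP parents) (parents.length+1) v := by
              have hd2 : ¬ (v ≠ 0 ∧ pvP parents v = v) := by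
                rintro ⟨_, h⟩; exact hjv h
              simp [pvC, pv_descb_self, hd2]
            rw [hCvv, F_rest_v, hstv0]
            ring
          · -- unrelated cell
            rw [if_neg hwv, hmval w hw,
              hkids_sum w hw (fun h => hwv h.symm) (Or.inr hwj)]
            ring
-- ---- parents-level facts ----
theorem pv_pre_hP (parents : List Int) (h : Pre_highscore parents) :
    ∀ i, 1 ≤ i → i < parents.length → pvP parents i < parents.length := by
  intro i h1 hi
  obtain ⟨hne, hb⟩ := h
  have hgd : parents.getD i 0 = parents[i] := by
    rw [List.getD_eq_getElem?_getD, List.getElem?_eq_getElem hi]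
    rfl
  have hmem : parents[i] ∈ parents.drop 1 := by
    have hdl : i - 1 < (parents.drop 1).length := by
      simp only [List.length_drop]
      omega
    have hEq : (parents.drop 1)[i-1]'hdl = parents[i] := by
      rw [List.getElem_drop]
      congr 1
      omega
    rw [← hEq]
    exact List.getElem_mem hdl
  obtain ⟨hl, hr⟩ := hb _ hmem
  unfold pvP pvIdx
  rw [hgd]
  split <;> omega

theorem pv_pvP_big (parents : List Int) :
    ∀ u, parents.length ≤ u → pvP parents u = 0 := by
  intro u hu
  unfold pvP pvIdx
  rw [List.getD_eq_default _ _ hu]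
  simp

theorem pv_kid_lt (n : Nat) (P : Nat → Nat) (v : Nat) :
    ∀ c ∈ pvKids n P v, c < n := fun c hcK => ((pv_mem_pvKids n P v c).1 hcK).2.1

-- the two scoring loops agree cell by cell
theorem pv_score_eq (n : Nat) (P : Nat → Nat)
    (subA subB prodB : List Int) (totalA totalB : Int) (ch : List (List Nat))
    (hsub : ∀ u, u < n → subA.getD u 0 = subB.getD u 0)
    (htot : totalA = totalB)
    (hkds : ∀ v, v < n → ch.getD v [] = pvKids n P v)
    (hprod : ∀ v, v < n → prodB.getD v 0 = ((pvKids n P v).map (fun c => subB.getD c 0)).prod) :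
    ((List.range n).foldl
      (fun (p : Int × Int) node =>
        let score : Int := 1
        let remsize := totalA - subA.getD node 0
        let score := if remsize > 0 then score * remsize else score
        let score := (ch.getD node []).foldl (fun s c => s * subA.getD c 0) score
        if score > p.1 then (score, 1)
        else if score = p.1 then (p.1, p.2 + 1) else p) ((0:Int), (0:Int))).2
    = ((List.range n).foldl
      (fun (p : Int × Int) v =>
        let rem := totalB - subB.getD v 0
        let score := (if rem > 0 then rem else 1) * prodB.getD v 0
        if score > p.1 then (score, 1)
        else if score = p.1 then (p.1, p.2 + 1) else p) ((0:Int), (0:Int))).2 := by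
  apply congrArg Prod.snd
  apply pv_foldl_congr
  intro p node hnode
  have hnd : node < n := List.mem_range.1 hnode
  have hscore : ((ch.getD node []).foldl (fun s c => s * subA.getD c 0)
      (if totalA - subA.getD node 0 > 0 then (1:Int) * (totalA - subA.getD node 0) else 1))
      = (if totalB - subB.getD node 0 > 0 then totalB - subB.getD node 0 else 1)
          * prodB.getD node 0 := by
    rw [pv_foldl_mul, hkds node hnd,
      List.map_congr_left (fun c hcK => hsub c (pv_kid_lt n P node c hcK)),
      hsub node hnd, htot, one_mul, hprod node hnd]
  simp only [hscore]

-- ---- main equivalence on Pre_ ----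
theorem pv_main (parents : List Int) (h : Pre_highscore parents) :
    highscore parents = highscore_alt parents := by
  have hP := pv_pre_hP parents h
  have hPbig := pv_pvP_big parents
  have hn1 : 0 < parents.length := List.length_pos_iff.mpr h.1
  have hroot : pvChainOK (pvP parents) 0 0 := ⟨rfl, fun j hj => absurd hj (Nat.not_lt_zero j)⟩
  -- fixed spellings of the shared children list, A's dfs state and B's subtree array
  have hAeq : highscore parents =
      ((List.range parents.length).foldl
        (fun (p : Int × Int) node =>
          let score : Int := 1
          let remsize := (pvDfsA ((List.range' 1 (parents.length-1)).foldl
              (fun ch i => ch.modify (pvIdx parents.length (parents.getD i 0)) (fun l => l ++ [i]))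
              (List.replicate parents.length ([] : List Nat))) (parents.length+1) 0
              (List.replicate parents.length (0:Int))).1
            - (pvDfsA ((List.range' 1 (parents.length-1)).foldl
              (fun ch i => ch.modify (pvIdx parents.length (parents.getD i 0)) (fun l => l ++ [i]))
              (List.replicate parents.length ([] : List Nat))) (parents.length+1) 0
              (List.replicate parents.length (0:Int))).2.getD node 0
          let score := if remsize > 0 then score * remsize else score
          let score := (((List.range' 1 (parents.length-1)).foldl
              (fun ch i => ch.modify (pvIdx parents.length (parents.getD i 0)) (fun l => l ++ [i]))
              (List.replicate parents.length ([] : List Nat))).getD node []).foldl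
              (fun s c => s * (pvDfsA ((List.range' 1 (parents.length-1)).foldl
                (fun ch i => ch.modify (pvIdx parents.length (parents.getD i 0)) (fun l => l ++ [i]))
                (List.replicate parents.length ([] : List Nat))) (parents.length+1) 0
                (List.replicate parents.length (0:Int))).2.getD c 0) score
          if score > p.1 then (score, 1)
          else if score = p.1 then (p.1, p.2 + 1) else p)
        ((0:Int), (0:Int))).2 := rfl
  have hBeq : highscore_alt parents =
      ((List.range parents.length).foldl
        (fun (p : Int × Int) v =>
          let rem := ((pvStackOrder ((List.range' 1 (parents.length-1)).foldl
                (fun ch i => ch.modify (pvIdx parents.length (parents.getD i 0)) (fun l => l ++ [i]))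
                (List.replicate parents.length ([] : List Nat))) parents.length [0] []).reverse.foldl
                (pvStep parents) (List.replicate parents.length (0:Int))).getD 0 0
            - ((pvStackOrder ((List.range' 1 (parents.length-1)).foldl
                (fun ch i => ch.modify (pvIdx parents.length (parents.getD i 0)) (fun l => l ++ [i]))
                (List.replicate parents.length ([] : List Nat))) parents.length [0] []).reverse.foldl
                (pvStep parents) (List.replicate parents.length (0:Int))).getD v 0
          let score := (if rem > 0 then rem else 1)
            * ((List.range' 1 (parents.length-1)).foldl
                (fun pr i => pr.modify (pvIdx parents.length (parents.getD i 0))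
                  (fun q => q * ((pvStackOrder ((List.range' 1 (parents.length-1)).foldl
                    (fun ch i => ch.modify (pvIdx parents.length (parents.getD i 0)) (fun l => l ++ [i]))
                    (List.replicate parents.length ([] : List Nat))) parents.length [0] []).reverse.foldl
                    (pvStep parents) (List.replicate parents.length (0:Int))).getD i 0))
                (List.replicate parents.length (1:Int))).getD v 0
          if score > p.1 then (score, 1)
          else if score = p.1 then (p.1, p.2 + 1) else p)
        ((0:Int), (0:Int))).2 := rfl
  rw [hAeq, hBeq]
  -- the children lists
  obtain ⟨hchL, hchG⟩ := pv_bucket_app (fun i => pvIdx parents.length (parents.getD i 0))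
      (List.range' 1 (parents.length - 1)) (List.replicate parents.length ([] : List Nat))
      (by
        intro i hi
        obtain ⟨h1, h2⟩ := List.mem_range'_1.1 hi
        simp only [List.length_replicate]
        exact hP i h1 (by omega))
  have hkds : ∀ v, v < parents.length →
      ((List.range' 1 (parents.length - 1)).foldl
          (fun ch i => ch.modify (pvIdx parents.length (parents.getD i 0)) (fun l => l ++ [i]))
          (List.replicate parents.length ([] : List Nat))).getD v []
        = pvKids parents.length (pvP parents) v := by
    intro v hv
    rw [hchG v (by simpa using hv), pv_getD_replicate parents.length v ([] : List Nat) [] hv]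
    simp only [List.nil_append]
    rfl
  -- A's dfs result
  obtain ⟨hA1, hA2, hA3⟩ := pv_dfs_spec parents.length (pvP parents) hP _ hkds
      (parents.length + 1) 0 0 (List.replicate parents.length (0:Int)) hroot hn1 (by omega) (by simp)
  -- B's subtree array via the stack-order fold
  have hsz0 : pvSz parents.length (pvP parents) (parents.length+1) 0 ≤ (parents.length : Int) := by
    rw [pv_sz_eq_count parents.length (pvP parents) hP parents.length 0 0 (by omega) hroot hn1]
    have := List.length_filter_le (fun u => pvDescb parents.length (pvP parents) 0 u)
      (List.range parents.length)
    simp only [List.length_range] at this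
    exact_mod_cast this
  obtain ⟨hB1, hB2⟩ := pv_stack_fold parents hP hPbig hn1 _ hkds
      parents.length [0] (List.replicate parents.length (0:Int))
      (fun x hx => by
        have : x = 0 := by simpa using hx
        subst this
        exact ⟨hn1, 0, hroot⟩)
      (List.pairwise_singleton _ _)
      (by simpa using hsz0)
      (by simp)
      (fun x hx u hu _ => by
        exact pv_getD_replicate parents.length u 0 0 hu)
  -- both subtree arrays are (if reachable u then size u else 0)
  have hsub : ∀ u, u < parents.length →
      (pvDfsA ((List.range' 1 (parents.length-1)).foldl
          (fun ch i => ch.modify (pvIdx parents.length (parents.getD i 0)) (fun l => l ++ [i]))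
          (List.replicate parents.length ([] : List Nat)))
        (parents.length + 1) 0 (List.replicate parents.length (0:Int))).2.getD u 0
      = ((pvStackOrder ((List.range' 1 (parents.length-1)).foldl
          (fun ch i => ch.modify (pvIdx parents.length (parents.getD i 0)) (fun l => l ++ [i]))
          (List.replicate parents.length ([] : List Nat)))
          parents.length [0] []).reverse.foldl (pvStep parents)
          (List.replicate parents.length (0:Int))).getD u 0 := by
    intro u hu
    rw [hA3 u hu, hB2 u hu, pv_getD_replicate parents.length u 0 0 hu]
    simp only [List.map_cons, List.map_nil, List.sum_cons, List.sum_nil, add_zero, zero_add]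
    by_cases hr : pvDescb parents.length (pvP parents) 0 u = true
    · rw [if_pos hr]
      simp [pvC, hr]
    · rw [if_neg hr]
      simp [pvC, hr]
  refine pv_score_eq parents.length (pvP parents) _ _ _ _ _ _ hsub ?_ hkds ?_
  · -- totals agree
    rw [hA1, hB2 0 hn1, pv_getD_replicate parents.length 0 0 0 hn1]
    simp [pvC, pv_descb_self]
  · -- product array
    intro v hv
    obtain ⟨hpL, hpG⟩ := pv_bucket_mul
        (fun i => pvIdx parents.length (parents.getD i 0))
        (fun i => ((pvStackOrder ((List.range' 1 (parents.length-1)).foldl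
            (fun ch i => ch.modify (pvIdx parents.length (parents.getD i 0)) (fun l => l ++ [i]))
            (List.replicate parents.length ([] : List Nat)))
            parents.length [0] []).reverse.foldl (pvStep parents)
            (List.replicate parents.length (0:Int))).getD i 0)
        (List.range' 1 (parents.length - 1)) (List.replicate parents.length (1:Int))
        (by
          intro i hi
          obtain ⟨h1, h2⟩ := List.mem_range'_1.1 hi
          simp only [List.length_replicate]
          exact hP i h1 (by omega))
    rw [hpG v (by simpa using hv), pv_getD_replicate parents.length v 1 0 hv, one_mul]
    rfl

-- ===== VERDICT (by name: the statement is the Claim_ definition above) =====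
theorem highscore_spec : Claim_equal_highscore := by
  intro parents _ hpre
  exact pv_main parents hpre
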